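-- pv_equiv track=rewrite | github.com/AlyaGomaa/bitsbehumble | source.py | zero_extend
-- ===== SOURCE A (Python) =====
-- def zero_extend(bin_str):
-- 	bin_str = bin_str.replace('0x','')
-- 	b= bin_str
-- 	if len(bin_str) % 8 != 0:
-- 		padding=''
-- 		while( len(bin_str) % 8 != 0 ):
-- 			padding += '0'
-- 			bin_str = padding + b
--
-- 	return bin_str
-- ===== SOURCE B (Python) =====
-- def zero_extend(bin_str):
--     bin_str = bin_str.replace('0x', '')
--     pad = (-len(bin_str)) % 8
--     return '0' * pad + bin_str
-- ===== Notes on version B (the rewrite author's own statement) =====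
-- stated objective: simpler
-- what changed: Replaced the incremental while-loop (which rebuilds bin_str from a growing padding string each iteration) with a closed-form padding count (-len) % 8 and a single string multiplication.
import Mathlib
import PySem

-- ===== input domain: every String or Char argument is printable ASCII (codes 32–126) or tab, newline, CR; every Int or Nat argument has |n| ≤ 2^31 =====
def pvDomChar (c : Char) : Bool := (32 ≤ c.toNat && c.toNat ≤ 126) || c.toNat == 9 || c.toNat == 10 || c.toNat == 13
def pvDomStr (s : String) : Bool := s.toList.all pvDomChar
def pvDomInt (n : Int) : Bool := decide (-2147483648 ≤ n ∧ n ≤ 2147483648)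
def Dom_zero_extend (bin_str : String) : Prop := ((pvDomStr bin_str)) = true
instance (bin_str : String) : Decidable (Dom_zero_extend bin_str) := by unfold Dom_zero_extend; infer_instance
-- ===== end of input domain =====

-- B replaces A's while-loop (growing padding, rebuilt bin_str) by the closed-form pad count (-len) % 8; objective: simpler.

-- ===== PORT A =====
-- the while loop: fuel 8 is a pure totality guard (the loop runs at most 7 times,
-- since padding grows by one '0' per iteration and stops when length % 8 = 0)
def zeLoop : Nat → List Char → List Char → List Char → List Char
  | 0, _, bs, _ => bs
  | f + 1, padding, bs, b =>
    if bs.length % 8 ≠ 0 then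
      zeLoop f (padding ++ ['0']) ((padding ++ ['0']) ++ b) b
    else bs

def zero_extend (bin_str : String) : String :=
  let bs := PySem.Str.replace bin_str "0x" ""
  let b := bs.toList
  if b.length % 8 ≠ 0 then String.ofList (zeLoop 8 [] b b) else bs

-- ===== PORT B =====
def zero_extend_alt (bin_str : String) : String :=
  let t := (PySem.Str.replace bin_str "0x" "").toList
  let pad := (PySem.Int.mod (-(t.length : Int)) 8).toNat
  String.ofList (List.replicate pad '0' ++ t)

-- ===== PRECONDITION & SPEC =====
def Spec_zero_extend (bin_str : String) (out : String) : Prop := out = zero_extend_alt bin_str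
instance (bin_str : String) (out : String) : Decidable (Spec_zero_extend bin_str out) := by unfold Spec_zero_extend; infer_instance

-- ===== CLAIM (what is proved, stated in full; the proofs are below) =====
def Claim_equal_zero_extend : Prop := ∀ (bin_str : String), Dom_zero_extend bin_str → Spec_zero_extend bin_str (zero_extend bin_str)

-- ===== LEMMAS AND PROOFS =====

theorem pymod_neg_eight (L : Nat) :
    (PySem.Int.mod (-(L : Int)) 8).toNat = (8 - L % 8) % 8 := by
  have h : Int.fmod (-(L : Int)) 8 = (-(L : Int)) % 8 := by
    rw [Int.fmod_eq_emod]; simp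
  simp only [PySem.Int.mod, h]
  omega

theorem zeLoop_eq (f : Nat) : ∀ (k : Nat) (t : List Char),
    8 - (k + t.length) % 8 ≤ f → (k + t.length) % 8 ≠ 0 →
    zeLoop f (List.replicate k '0') (List.replicate k '0' ++ t) t
      = List.replicate (k + (8 - (k + t.length) % 8)) '0' ++ t := by
  induction f with
  | zero => intro k t hf h; omega
  | succ f ih =>
    intro k t hf h
    have hlen : (List.replicate k '0' ++ t).length % 8 = (k + t.length) % 8 := by simp
    rw [zeLoop, if_pos (by rw [hlen]; exact h)]
    have hrep : List.replicate k '0' ++ ['0'] = List.replicate (k + 1) '0' := by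
      rw [List.replicate_succ']
    rw [hrep]
    by_cases h2 : (k + 1 + t.length) % 8 = 0
    · have hstop : zeLoop f (List.replicate (k + 1) '0') (List.replicate (k + 1) '0' ++ t) t
          = List.replicate (k + 1) '0' ++ t := by
        cases f with
        | zero => rfl
        | succ f => rw [zeLoop, if_neg (by simp; omega)]
      rw [hstop]
      have : k + (8 - (k + t.length) % 8) = k + 1 := by omega
      rw [this]
    · rw [ih (k + 1) t (by omega) h2]
      have : k + 1 + (8 - (k + 1 + t.length) % 8) = k + (8 - (k + t.length) % 8) := by omega
      rw [this]

-- ===== VERDICT (by name: the statement is the Claim_ definition above) =====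
theorem zero_extend_spec : Claim_equal_zero_extend := by
  intro s _
  unfold Spec_zero_extend
  simp only [zero_extend, zero_extend_alt]
  rw [pymod_neg_eight]
  generalize PySem.Str.replace s "0x" "" = bs
  by_cases h : bs.toList.length % 8 = 0
  · rw [if_neg (by omega)]
    have h0 : (8 - bs.toList.length % 8) % 8 = 0 := by omega
    rw [h0, List.replicate_zero, List.nil_append]
    exact String.ofList_toList.symm
  · rw [if_pos (by omega)]
    have h8 := zeLoop_eq 8 0 bs.toList (by omega) (by omega)
    simp only [List.replicate_zero, List.nil_append, Nat.zero_add] at h8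
    rw [h8]
    rw [Nat.mod_eq_of_lt (show 8 - bs.toList.length % 8 < 8 by omega)]
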